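-- pv_equiv track=rewrite | github.com/vidzza/GODEYE | parsers/network/suricata_parser.py | _map_to_mitre
-- ===== SOURCE A (Python) =====
-- def _map_to_mitre(signature: str) -> str:
--     """Map signature to MITRE ATT&CK tactic (simplified)"""
--     signature_lower = signature.lower()
--
--     # Simplified mapping - in production, use proper MITRE mapping
--     if any(x in signature_lower for x in ['port scan', 'nmap', 'scan']):
--         return 'TA0043'  # Reconnaissance
--     if any(x in signature_lower for x in ['brute force', 'password', 'login failed']):
--         return 'TA0006'  # Credential Access
--     if any(x in signature_lower for x in ['web attack', 'sqli', 'xss', 'injection']):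
--         return 'TA0001'  # Initial Access
--     if any(x in signature_lower for x in ['shellcode', 'exploit', 'cve']):
--         return 'TA0002'  # Execution
--     if any(x in signature_lower for x in ['malware', 'trojan', 'backdoor']):
--         return 'TA0001'  # Initial Access / Persistence
--     if any(x in signature_lower for x in ['ransomware', 'file encryption']):
--         return 'TA0040'  # Impact
--
--     return ''
-- ===== SOURCE B (Python) =====
-- _CODES = ('TA0043', 'TA0006', 'TA0001', 'TA0002', 'TA0001', 'TA0040')
--
-- _PATTERNS = (
--     ('port scan', 0), ('nmap', 0), ('scan', 0),
--     ('brute force', 1), ('password', 1), ('login failed', 1),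
--     ('web attack', 2), ('sqli', 2), ('xss', 2), ('injection', 2),
--     ('shellcode', 3), ('exploit', 3), ('cve', 3),
--     ('malware', 4), ('trojan', 4), ('backdoor', 4),
--     ('ransomware', 5), ('file encryption', 5),
-- )
--
--
-- def _map_to_mitre(signature: str) -> str:
--     """Single pass over string positions, keeping the minimum rule priority matched."""
--     sig = signature.lower()
--     best = len(_CODES)
--     for i in range(len(sig) + 1):
--         for pat, pr in _PATTERNS:
--             if pr < best and sig.startswith(pat, i):
--                 best = pr
--     return _CODES[best] if best < len(_CODES) else ''
-- ===== Notes on version B (the rewrite author's own statement) =====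
-- stated objective: alternative
-- what changed: B inverts the traversal: instead of A's rule-by-rule early-return chain of substring searches, B makes one pass over the positions of the lowercased signature, checks which patterns start at each position, keeps the minimum rule priority in an accumulator, and indexes a code table at the end.
import Mathlib
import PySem

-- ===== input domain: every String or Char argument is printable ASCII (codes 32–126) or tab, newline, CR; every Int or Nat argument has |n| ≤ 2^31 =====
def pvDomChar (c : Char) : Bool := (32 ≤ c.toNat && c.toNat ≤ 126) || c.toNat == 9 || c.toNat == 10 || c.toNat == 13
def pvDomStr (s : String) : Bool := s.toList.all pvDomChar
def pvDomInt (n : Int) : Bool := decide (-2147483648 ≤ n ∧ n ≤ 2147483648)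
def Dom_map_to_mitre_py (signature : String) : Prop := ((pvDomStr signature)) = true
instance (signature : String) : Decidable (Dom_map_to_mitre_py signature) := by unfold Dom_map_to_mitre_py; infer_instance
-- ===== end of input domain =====

-- B replaces A's rule-by-rule early-return chain of substring searches with a single pass
-- over the string positions that keeps the minimum matched rule priority (objective: alternative).

-- ===== PORT A =====
def map_to_mitre_py (signature : String) : String :=
  let signature_lower := PySem.Str.lower signature
  if ["port scan", "nmap", "scan"].any (fun x => PySem.Str.isIn x signature_lower) then
    "TA0043"
  else if ["brute force", "password", "login failed"].any (fun x => PySem.Str.isIn x signature_lower) then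
    "TA0006"
  else if ["web attack", "sqli", "xss", "injection"].any (fun x => PySem.Str.isIn x signature_lower) then
    "TA0001"
  else if ["shellcode", "exploit", "cve"].any (fun x => PySem.Str.isIn x signature_lower) then
    "TA0002"
  else if ["malware", "trojan", "backdoor"].any (fun x => PySem.Str.isIn x signature_lower) then
    "TA0001"
  else if ["ransomware", "file encryption"].any (fun x => PySem.Str.isIn x signature_lower) then
    "TA0040"
  else ""

-- ===== PORT B =====
def mitreCodes : List String := ["TA0043", "TA0006", "TA0001", "TA0002", "TA0001", "TA0040"]

def mitrePatterns : List (String × Nat) :=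
  [("port scan", 0), ("nmap", 0), ("scan", 0),
   ("brute force", 1), ("password", 1), ("login failed", 1),
   ("web attack", 2), ("sqli", 2), ("xss", 2), ("injection", 2),
   ("shellcode", 3), ("exploit", 3), ("cve", 3),
   ("malware", 4), ("trojan", 4), ("backdoor", 4),
   ("ransomware", 5), ("file encryption", 5)]

-- `sig.startswith(pat, i)` with 0 ≤ i ≤ len(sig) is exactly `pat.toList.isPrefixOf (sig.drop i)`
-- (hand-ported, exact on that range; Source B only calls it there).
def map_to_mitre_py_alt (signature : String) : String :=
  let sig := (PySem.Str.lower signature).toList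
  let best := (List.range (sig.length + 1)).foldl
    (fun best i => mitrePatterns.foldl
      (fun best p => if p.2 < best ∧ p.1.toList.isPrefixOf (sig.drop i) then p.2 else best) best)
    mitreCodes.length
  if best < mitreCodes.length then mitreCodes.getD best "" else ""

-- ===== PRECONDITION & SPEC =====
def Spec_map_to_mitre_py (signature : String) (out : String) : Prop := out = map_to_mitre_py_alt signature
instance (signature : String) (out : String) : Decidable (Spec_map_to_mitre_py signature out) := by unfold Spec_map_to_mitre_py; infer_instance

-- ===== CLAIM (what is proved, stated in full; the proofs are below) =====
def Claim_equal_map_to_mitre_py : Prop := ∀ (signature : String), Dom_map_to_mitre_py signature → Spec_map_to_mitre_py signature (map_to_mitre_py signature)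

-- ===== LEMMAS AND PROOFS =====

-- The fold used by B computes a running minimum: its result is ≤ init, is achieved by a
-- matching element or equals init, and is ≤ every matching element's priority.
lemma foldl_min_spec {α : Type} (P : α → Prop) [DecidablePred P] (g : α → Nat) :
    ∀ (L : List α) (init : Nat),
      (L.foldl (fun acc a => if g a < acc ∧ P a then g a else acc) init = init ∨
        ∃ a ∈ L, P a ∧ g a = L.foldl (fun acc a => if g a < acc ∧ P a then g a else acc) init) ∧
      L.foldl (fun acc a => if g a < acc ∧ P a then g a else acc) init ≤ init ∧
      (∀ a ∈ L, P a → L.foldl (fun acc a => if g a < acc ∧ P a then g a else acc) init ≤ g a) := by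
  intro L
  induction L with
  | nil => intro init; simp
  | cons a t ih =>
    intro init
    simp only [List.foldl_cons]
    by_cases hc : g a < init ∧ P a
    · rw [if_pos hc]
      obtain ⟨hach, hle, hmin⟩ := ih (g a)
      refine ⟨?_, le_trans hle (le_of_lt hc.1), ?_⟩
      · rcases hach with h | ⟨b, hb, hPb, hgb⟩
        · exact Or.inr ⟨a, List.mem_cons_self, hc.2, h.symm⟩
        · exact Or.inr ⟨b, List.mem_cons_of_mem _ hb, hPb, hgb⟩
      · intro b hb hPb
        rcases List.mem_cons.mp hb with rfl | hbt
        · exact hle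
        · exact hmin b hbt hPb
    · rw [if_neg hc]
      obtain ⟨hach, hle, hmin⟩ := ih init
      refine ⟨?_, hle, ?_⟩
      · rcases hach with h | ⟨b, hb, hPb, hgb⟩
        · exact Or.inl h
        · exact Or.inr ⟨b, List.mem_cons_of_mem _ hb, hPb, hgb⟩
      · intro b hb hPb
        rcases List.mem_cons.mp hb with rfl | hbt
        · exact le_trans hle (Nat.le_of_not_lt (fun hlt => hc ⟨hlt, hPb⟩))
        · exact hmin b hbt hPb

-- Flattening B's nested fold (positions outside, patterns inside) into one fold over pairs.
lemma foldl_nested_eq_flat {α β γ : Type} (F : γ → α → β → γ) (inner : List β) :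
    ∀ (outer : List α) (init : γ),
      outer.foldl (fun acc i => inner.foldl (fun a p => F a i p) acc) init
        = (outer.flatMap (fun i => inner.map (fun p => (i, p)))).foldl
            (fun a x => F a x.1 x.2) init := by
  intro outer
  induction outer with
  | nil => intro init; simp
  | cons i t ih =>
    intro init
    simp only [List.foldl_cons, List.flatMap_cons, List.foldl_append, List.foldl_map]
    exact ih _

def mitreFlat (sig : List Char) : List (Nat × (String × Nat)) :=
  (List.range (sig.length + 1)).flatMap (fun i => mitrePatterns.map (fun p => (i, p)))

def mitreBest (sig : List Char) : Nat :=
  (mitreFlat sig).foldl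
    (fun a x => if x.2.2 < a ∧ x.2.1.toList.isPrefixOf (sig.drop x.1) then x.2.2 else a) 6

lemma alt_eq_best (signature : String) :
    map_to_mitre_py_alt signature =
      (if mitreBest ((PySem.Str.lower signature).toList) < 6 then
        mitreCodes.getD (mitreBest ((PySem.Str.lower signature).toList)) "" else "") := by
  have h := foldl_nested_eq_flat
    (fun a i p => if p.2 < a ∧ p.1.toList.isPrefixOf (((PySem.Str.lower signature).toList).drop i) then p.2 else a)
    mitrePatterns (List.range ((PySem.Str.lower signature).toList.length + 1)) 6
  unfold map_to_mitre_py_alt mitreBest mitreFlat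
  simp only [show mitreCodes.length = 6 from rfl, h]

-- "some pattern of priority pr occurs in sig"
def MatchedAt (sig : List Char) (pr : Nat) : Prop :=
  ∃ p ∈ mitrePatterns, p.2 = pr ∧ p.1.toList <:+: sig

lemma patterns_ne_nil : ∀ p ∈ mitrePatterns, p.1.toList ≠ [] := by decide

lemma exists_pos_iff_infix (sig : List Char) (pat : List Char) (hne : pat ≠ []) :
    (∃ i ∈ List.range (sig.length + 1), pat.isPrefixOf (sig.drop i) = true) ↔ pat <:+: sig := by
  constructor
  · rintro ⟨i, -, hp⟩
    have h1 : ∃ j, pat <+: sig.drop j := ⟨i, List.isPrefixOf_iff_prefix.mp hp⟩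
    exact (PySem.Chars.isIn_iff_infix pat sig).mp ((PySem.Chars.exists_prefix_drop_iff_isIn pat sig).mp h1)
  · intro hinf
    obtain ⟨j, hj⟩ := (PySem.Chars.exists_prefix_drop_iff_isIn pat sig).mpr
      ((PySem.Chars.isIn_iff_infix pat sig).mpr hinf)
    by_cases hle : j ≤ sig.length
    · exact ⟨j, List.mem_range.mpr (by omega), List.isPrefixOf_iff_prefix.mpr hj⟩
    · exfalso
      rw [List.drop_eq_nil_of_le (by omega)] at hj
      exact hne (List.prefix_nil.mp hj)

-- key characterization of B's running minimum
lemma best_spec (sig : List Char) :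
    (mitreBest sig = 6 ∨ MatchedAt sig (mitreBest sig)) ∧
      mitreBest sig ≤ 6 ∧ (∀ pr, MatchedAt sig pr → mitreBest sig ≤ pr) := by
  obtain ⟨hach, hle, hmin⟩ := foldl_min_spec
    (fun x : Nat × (String × Nat) => x.2.1.toList.isPrefixOf (sig.drop x.1) = true)
    (fun x => x.2.2) (mitreFlat sig) 6
  have hmem : ∀ x : Nat × (String × Nat), x ∈ mitreFlat sig ↔
      (x.1 ∈ List.range (sig.length + 1) ∧ x.2 ∈ mitrePatterns) := by
    intro x
    unfold mitreFlat
    simp only [List.mem_flatMap, List.mem_map]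
    constructor
    · rintro ⟨i, hi, p, hp, rfl⟩; exact ⟨hi, hp⟩
    · rintro ⟨hi, hp⟩; exact ⟨x.1, hi, x.2, hp, rfl⟩
  have hbdef : mitreBest sig = (mitreFlat sig).foldl
      (fun a x => if x.2.2 < a ∧ x.2.1.toList.isPrefixOf (sig.drop x.1) = true then x.2.2 else a)
      6 := rfl
  refine ⟨?_, ?_, ?_⟩
  · rcases hach with h | ⟨x, hx, hPx, hgx⟩
    · exact Or.inl (by rw [hbdef]; exact h)
    · refine Or.inr ?_
      obtain ⟨hi, hp⟩ := (hmem x).mp hx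
      refine ⟨x.2, hp, by rw [hbdef]; exact hgx, ?_⟩
      exact (exists_pos_iff_infix sig x.2.1.toList (patterns_ne_nil x.2 hp)).mp ⟨x.1, hi, hPx⟩
  · rw [hbdef]; exact hle
  · rintro pr ⟨p, hp, rfl, hinf⟩
    obtain ⟨i, hi, hpre⟩ := (exists_pos_iff_infix sig p.1.toList (patterns_ne_nil p hp)).mpr hinf
    have := hmin (i, p) ((hmem (i, p)).mpr ⟨hi, hp⟩) hpre
    rw [hbdef]; exact this

lemma matched_le (sig : List Char) (pr : Nat) (h : MatchedAt sig pr) : pr ≤ 5 := by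
  obtain ⟨p, hp, rfl, -⟩ := h
  have hall : ∀ p ∈ mitrePatterns, p.2 ≤ 5 := by decide
  exact hall p hp

lemma matchedAt_iff (sig : List Char) :
    (MatchedAt sig 0 ↔ ("port scan".toList <:+: sig ∨ "nmap".toList <:+: sig ∨ "scan".toList <:+: sig)) ∧
    (MatchedAt sig 1 ↔ ("brute force".toList <:+: sig ∨ "password".toList <:+: sig ∨ "login failed".toList <:+: sig)) ∧
    (MatchedAt sig 2 ↔ ("web attack".toList <:+: sig ∨ "sqli".toList <:+: sig ∨ "xss".toList <:+: sig ∨ "injection".toList <:+: sig)) ∧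
    (MatchedAt sig 3 ↔ ("shellcode".toList <:+: sig ∨ "exploit".toList <:+: sig ∨ "cve".toList <:+: sig)) ∧
    (MatchedAt sig 4 ↔ ("malware".toList <:+: sig ∨ "trojan".toList <:+: sig ∨ "backdoor".toList <:+: sig)) ∧
    (MatchedAt sig 5 ↔ ("ransomware".toList <:+: sig ∨ "file encryption".toList <:+: sig)) := by
  refine ⟨?_, ?_, ?_, ?_, ?_, ?_⟩ <;>
    simp [MatchedAt, mitrePatterns]

set_option maxHeartbeats 2000000 in
lemma main_eq (signature : String) :
    map_to_mitre_py signature = map_to_mitre_py_alt signature := by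
  have halt := alt_eq_best signature
  set sig := (PySem.Str.lower signature).toList with hsig
  obtain ⟨hach, hle6, hmin⟩ := best_spec sig
  obtain ⟨hm0, hm1, hm2, hm3, hm4, hm5⟩ := matchedAt_iff sig
  rw [halt]
  unfold map_to_mitre_py
  simp only [List.any_cons, List.any_nil, Bool.or_false, Bool.or_eq_true,
    PySem.Str.isIn_iff_infix, ← hsig]
  by_cases h0 : ("port scan".toList <:+: sig ∨ "nmap".toList <:+: sig ∨ "scan".toList <:+: sig)
  · rw [if_pos h0]
    have hb : mitreBest sig = 0 := Nat.le_zero.mp (hmin 0 (hm0.mpr h0))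
    rw [hb]; rfl
  rw [if_neg h0]
  by_cases h1 : ("brute force".toList <:+: sig ∨ "password".toList <:+: sig ∨ "login failed".toList <:+: sig)
  · rw [if_pos h1]
    have hb : mitreBest sig = 1 := by
      have hle := hmin 1 (hm1.mpr h1)
      rcases hach with h6 | hM'
      · omega
      · have hne0 : mitreBest sig ≠ 0 := fun he => h0 (hm0.mp (he ▸ hM'))
        omega
    rw [hb]; rfl
  rw [if_neg h1]
  by_cases h2 : ("web attack".toList <:+: sig ∨ "sqli".toList <:+: sig ∨ "xss".toList <:+: sig ∨ "injection".toList <:+: sig)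
  · rw [if_pos h2]
    have hb : mitreBest sig = 2 := by
      have hle := hmin 2 (hm2.mpr h2)
      rcases hach with h6 | hM'
      · omega
      · have hne0 : mitreBest sig ≠ 0 := fun he => h0 (hm0.mp (he ▸ hM'))
        have hne1 : mitreBest sig ≠ 1 := fun he => h1 (hm1.mp (he ▸ hM'))
        omega
    rw [hb]; rfl
  rw [if_neg h2]
  by_cases h3 : ("shellcode".toList <:+: sig ∨ "exploit".toList <:+: sig ∨ "cve".toList <:+: sig)
  · rw [if_pos h3]
    have hb : mitreBest sig = 3 := by
      have hle := hmin 3 (hm3.mpr h3)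
      rcases hach with h6 | hM'
      · omega
      · have hne0 : mitreBest sig ≠ 0 := fun he => h0 (hm0.mp (he ▸ hM'))
        have hne1 : mitreBest sig ≠ 1 := fun he => h1 (hm1.mp (he ▸ hM'))
        have hne2 : mitreBest sig ≠ 2 := fun he => h2 (hm2.mp (he ▸ hM'))
        omega
    rw [hb]; rfl
  rw [if_neg h3]
  by_cases h4 : ("malware".toList <:+: sig ∨ "trojan".toList <:+: sig ∨ "backdoor".toList <:+: sig)
  · rw [if_pos h4]
    have hb : mitreBest sig = 4 := by
      have hle := hmin 4 (hm4.mpr h4)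
      rcases hach with h6 | hM'
      · omega
      · have hne0 : mitreBest sig ≠ 0 := fun he => h0 (hm0.mp (he ▸ hM'))
        have hne1 : mitreBest sig ≠ 1 := fun he => h1 (hm1.mp (he ▸ hM'))
        have hne2 : mitreBest sig ≠ 2 := fun he => h2 (hm2.mp (he ▸ hM'))
        have hne3 : mitreBest sig ≠ 3 := fun he => h3 (hm3.mp (he ▸ hM'))
        omega
    rw [hb]; rfl
  rw [if_neg h4]
  by_cases h5 : ("ransomware".toList <:+: sig ∨ "file encryption".toList <:+: sig)
  · rw [if_pos h5]
    have hb : mitreBest sig = 5 := by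
      have hle := hmin 5 (hm5.mpr h5)
      rcases hach with h6 | hM'
      · omega
      · have hne0 : mitreBest sig ≠ 0 := fun he => h0 (hm0.mp (he ▸ hM'))
        have hne1 : mitreBest sig ≠ 1 := fun he => h1 (hm1.mp (he ▸ hM'))
        have hne2 : mitreBest sig ≠ 2 := fun he => h2 (hm2.mp (he ▸ hM'))
        have hne3 : mitreBest sig ≠ 3 := fun he => h3 (hm3.mp (he ▸ hM'))
        have hne4 : mitreBest sig ≠ 4 := fun he => h4 (hm4.mp (he ▸ hM'))
        omega
    rw [hb]; rfl
  rw [if_neg h5]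
  have hb : mitreBest sig = 6 := by
    rcases hach with h6 | hM'
    · exact h6
    · have hle5 := matched_le sig _ hM'
      have hne0 : mitreBest sig ≠ 0 := fun he => h0 (hm0.mp (he ▸ hM'))
      have hne1 : mitreBest sig ≠ 1 := fun he => h1 (hm1.mp (he ▸ hM'))
      have hne2 : mitreBest sig ≠ 2 := fun he => h2 (hm2.mp (he ▸ hM'))
      have hne3 : mitreBest sig ≠ 3 := fun he => h3 (hm3.mp (he ▸ hM'))
      have hne4 : mitreBest sig ≠ 4 := fun he => h4 (hm4.mp (he ▸ hM'))
      have hne5 : mitreBest sig ≠ 5 := fun he => h5 (hm5.mp (he ▸ hM'))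
      omega
  rw [hb]; rfl

-- ===== VERDICT (by name: the statement is the Claim_ definition above) =====
set_option maxHeartbeats 2000000 in
theorem map_to_mitre_py_spec : Claim_equal_map_to_mitre_py := by
  intro signature _
  unfold Spec_map_to_mitre_py
  exact main_eq signature
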